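-- pv_equiv track=rewrite | github.com/VuBui217/dailycodingchallenge | codesignal/test1.py | problem3_sol2
-- ===== SOURCE A (Python) =====
-- def problem3_sol2(nums, threshold):
--     n = len(nums)
--     prefix = [0]
--     for num in nums:
--         prefix.append(prefix[-1] + num)
--
--     max_len = 0
--     for l in range(n):
--         for r in range(l, n):
--             if prefix[r+1] - 2*prefix[l] <= threshold:
--                 max_len = max(max_len, r - l + 1)
--     return max_len
-- ===== SOURCE B (Python) =====
-- def problem3_sol2(nums, threshold):
--     # O(n log n): suffix minima of the prefix sums + per-l binary search for the
--     # rightmost prefix index whose suffix-minimum is within the bound.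
--     n = len(nums)
--     prefix = [0]
--     for x in nums:
--         prefix.append(prefix[-1] + x)
--     # sufmin[j] = min(prefix[j:]) ; nondecreasing in j
--     sufmin = [0] * (n + 1)
--     sufmin[n] = prefix[n]
--     for j in range(n - 1, -1, -1):
--         sufmin[j] = min(prefix[j], sufmin[j + 1])
--     best = 0
--     for l in range(n):
--         bound = threshold + 2 * prefix[l]
--         lo, hi, ans = l + 1, n, l  # ans == l means "no valid r for this l"
--         while lo <= hi:
--             mid = (lo + hi) // 2
--             if sufmin[mid] <= bound:
--                 ans = mid
--                 lo = mid + 1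
--             else:
--                 hi = mid - 1
--         if ans - l > best:
--             best = ans - l
--     return best
-- ===== Notes on version B (the rewrite author's own statement) =====
-- stated objective: faster
-- what changed: Replaces the O(n^2) double loop over all (l,r) pairs with suffix minima of the prefix-sum array plus, for each l, a binary search for the rightmost prefix index whose suffix minimum is within the bound, giving O(n log n).
import Mathlib
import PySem

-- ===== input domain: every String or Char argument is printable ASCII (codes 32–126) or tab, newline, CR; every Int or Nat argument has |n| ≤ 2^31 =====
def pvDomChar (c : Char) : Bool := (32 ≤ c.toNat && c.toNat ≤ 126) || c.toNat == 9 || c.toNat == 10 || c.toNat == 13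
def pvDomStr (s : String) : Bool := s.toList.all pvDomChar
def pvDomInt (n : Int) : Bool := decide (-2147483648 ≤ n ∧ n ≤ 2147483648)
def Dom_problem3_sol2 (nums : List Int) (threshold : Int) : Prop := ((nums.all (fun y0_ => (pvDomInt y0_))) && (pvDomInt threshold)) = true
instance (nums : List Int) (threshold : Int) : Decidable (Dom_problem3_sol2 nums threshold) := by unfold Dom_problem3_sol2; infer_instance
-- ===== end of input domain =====

-- B replaces A's O(n^2) double loop with suffix minima of the prefix sums plus a
-- per-l binary search for the rightmost admissible prefix index (faster).


-- ===== PORT A =====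
def problem3_sol2 (nums : List Int) (threshold : Int) : Int :=
  let n : Int := nums.length
  let pref := nums.foldl (fun p num => p ++ [PySem.List.pyGetD p (-1) 0 + num]) [0]
  (PySem.List.pyRange 0 n 1).foldl (fun maxLen l =>
    (PySem.List.pyRange l n 1).foldl (fun acc r =>
      if PySem.List.pyGetD pref (r + 1) 0 - 2 * PySem.List.pyGetD pref l 0 ≤ threshold
      then max acc (r - l + 1) else acc) maxLen) 0

-- ===== PORT B =====
-- suffix minima: (sufmins P)[j] = min(P[j:]) (Source B's backward loop, as right-to-left recursion)
def sufmins : List Int → List Int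
  | [] => []
  | x :: xs =>
    match sufmins xs with
    | [] => [x]
    | s :: ss => min x s :: s :: ss

-- Source B's while-loop (mid = (lo+hi)//2): largest j in [lo, hi] with S[j] <= bound, sentinel ans if none
def bsearch (S : List Int) (bound : Int) (lo hi ans : Int) : Int :=
  if h : lo ≤ hi then
    if PySem.List.pyGetD S (PySem.Int.floordiv (lo + hi) 2) 0 ≤ bound then
      bsearch S bound (PySem.Int.floordiv (lo + hi) 2 + 1) hi (PySem.Int.floordiv (lo + hi) 2)
    else bsearch S bound lo (PySem.Int.floordiv (lo + hi) 2 - 1) ans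
  else ans
termination_by (hi + 1 - lo).toNat
decreasing_by
  all_goals
    have hm := PySem.Int.floordiv_two_mid_bounds h
    omega

def problem3_sol2_alt (nums : List Int) (threshold : Int) : Int :=
  let n : Int := nums.length
  let pref := nums.foldl (fun p num => p ++ [PySem.List.pyGetD p (-1) 0 + num]) [0]
  let sufmin := sufmins pref
  (PySem.List.pyRange 0 n 1).foldl (fun best l =>
    let bound := threshold + 2 * PySem.List.pyGetD pref l 0
    let ans := bsearch sufmin bound (l + 1) n l
    if ans - l > best then ans - l else best) 0

-- ===== PRECONDITION & SPEC =====
def Spec_problem3_sol2 (nums : List Int) (threshold : Int) (out : Int) : Prop := out = problem3_sol2_alt nums threshold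
instance (nums : List Int) (threshold : Int) (out : Int) : Decidable (Spec_problem3_sol2 nums threshold out) := by unfold Spec_problem3_sol2; infer_instance

-- ===== CLAIM (what is proved, stated in full; the proofs are below) =====
def Claim_equal_problem3_sol2 : Prop := ∀ (nums : List Int) (threshold : Int), Dom_problem3_sol2 nums threshold → Spec_problem3_sol2 nums threshold (problem3_sol2 nums threshold)

-- ===== LEMMAS AND PROOFS =====

-- length of the prefix list built by the fold
theorem pfx_length (nums : List Int) (acc : List Int) :
    (nums.foldl (fun p num => p ++ [PySem.List.pyGetD p (-1) 0 + num]) acc).length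
      = acc.length + nums.length := by
  induction nums generalizing acc with
  | nil => simp
  | cons x xs ih =>
    rw [List.foldl_cons, ih]
    simp
    omega

theorem sufmins_length (P : List Int) : (sufmins P).length = P.length := by
  induction P with
  | nil => rfl
  | cons x xs ih =>
    cases hs : sufmins xs with
    | nil =>
      have hxs : xs.length = 0 := by rw [← ih, hs]; rfl
      simp [sufmins, hs, hxs]
    | cons s ss =>
      simp only [sufmins, hs, List.length_cons]
      rw [← ih, hs]
      rfl

-- bridge: pyGetD at a Nat index is getD
theorem pyGetD_nat (S : List Int) (j : ℕ) :
    PySem.List.pyGetD S (j : Int) 0 = S.getD j 0 := by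
  simp

-- sufmin[j] ≤ P[k] for j ≤ k < |P|
theorem sufmins_le (P : List Int) : ∀ j k : ℕ, j ≤ k → k < P.length →
    (sufmins P).getD j 0 ≤ P.getD k 0 := by
  induction P with
  | nil => intro j k _ hk; simp at hk
  | cons x xs ih =>
    intro j k hjk hk
    cases hs : sufmins xs with
    | nil =>
      have hxs : xs.length = 0 := by rw [← sufmins_length, hs]; rfl
      have hk0 : k = 0 := by simp at hk; omega
      have hj0 : j = 0 := by omega
      subst hk0; subst hj0
      simp [sufmins, hs]
    | cons s ss =>
      have hhead : sufmins (x :: xs) = min x s :: s :: ss := by simp [sufmins, hs]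
      rw [hhead]
      cases j with
      | zero =>
        cases k with
        | zero => simp
        | succ k' =>
          have hk' : k' < xs.length := by simpa using hk
          have h0 := ih 0 k' (Nat.zero_le _) hk'
          rw [hs] at h0
          simp only [List.getD_cons_zero, List.getD_cons_succ] at h0 ⊢
          omega
      | succ j' =>
        cases k with
        | zero => omega
        | succ k' =>
          have hk' : k' < xs.length := by simpa using hk
          have h0 := ih j' k' (by omega) hk'
          rw [hs] at h0
          simpa using h0

-- sufmin[j] is attained at some k ≥ j
theorem sufmins_exists (P : List Int) : ∀ j : ℕ, j < P.length →
    ∃ k : ℕ, j ≤ k ∧ k < P.length ∧ (sufmins P).getD j 0 = P.getD k 0 := by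
  induction P with
  | nil => intro j hj; simp at hj
  | cons x xs ih =>
    intro j hj
    cases hs : sufmins xs with
    | nil =>
      have hxs : xs.length = 0 := by rw [← sufmins_length, hs]; rfl
      have hj0 : j = 0 := by simp at hj; omega
      subst hj0
      exact ⟨0, le_refl _, by simp, by simp [sufmins, hs]⟩
    | cons s ss =>
      have hhead : sufmins (x :: xs) = min x s :: s :: ss := by simp [sufmins, hs]
      have hxslen : 0 < xs.length := by
        rw [← sufmins_length, hs]; simp
      rw [hhead]
      cases j with
      | zero =>
        rcases ih 0 hxslen with ⟨k, _, hk, hkeq⟩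
        rw [hs] at hkeq
        simp only [List.getD_cons_zero] at hkeq
        by_cases hxle : x ≤ s
        · exact ⟨0, le_refl _, by simp, by simp; omega⟩
        · refine ⟨k + 1, by omega, by simpa using hk, ?_⟩
          simp only [List.getD_cons_zero, List.getD_cons_succ]
          rw [← hkeq]; omega
      | succ j' =>
        have hj' : j' < xs.length := by simpa using hj
        rcases ih j' hj' with ⟨k, hjk, hk, hkeq⟩
        refine ⟨k + 1, by omega, by simpa using hk, ?_⟩
        simp only [List.getD_cons_succ]
        rw [← hs] at *
        simpa using hkeq

-- greatest j in [0, f] with S[j] ≤ bound, or -1 (proof-side characterisation of the search target)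
def kmax (S : List Int) (bound : Int) : ℕ → Int
  | 0 => if PySem.List.pyGetD S 0 0 ≤ bound then 0 else -1
  | (j + 1) => if PySem.List.pyGetD S ((j : Int) + 1) 0 ≤ bound then (j : Int) + 1 else kmax S bound j

theorem kmax_le (S : List Int) (bound : Int) (f : ℕ) : kmax S bound f ≤ (f : Int) := by
  induction f with
  | zero => simp [kmax]; split <;> omega
  | succ f ih => simp only [kmax]; split <;> push_cast <;> omega

theorem kmax_ge (S : List Int) (bound : Int) (f : ℕ) : -1 ≤ kmax S bound f := by
  induction f with
  | zero => simp [kmax]; split <;> omega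
  | succ f ih =>
    simp only [kmax]; split
    · omega
    · exact ih

theorem kmax_iff (S : List Int) (bound : Int) (f : ℕ)
    (hdc : ∀ i j : ℕ, i ≤ j → j ≤ f → PySem.List.pyGetD S (j : Int) 0 ≤ bound →
      PySem.List.pyGetD S (i : Int) 0 ≤ bound) :
    ∀ j : ℕ, j ≤ f → (PySem.List.pyGetD S (j : Int) 0 ≤ bound ↔ (j : Int) ≤ kmax S bound f) := by
  induction f with
  | zero =>
    intro j hj
    have hj0 : j = 0 := by omega
    subst hj0
    simp only [kmax, Nat.cast_zero]
    split <;> rename_i h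
    · constructor
      · intro _; omega
      · intro _; exact h
    · constructor
      · intro hh; exact absurd hh h
      · intro hh; omega
  | succ f ih =>
    intro j hj
    by_cases hlast : PySem.List.pyGetD S ((f : Int) + 1) 0 ≤ bound
    · have hk : kmax S bound (f + 1) = (f : Int) + 1 := by simp [kmax, hlast]
      rw [hk]
      constructor
      · intro _; push_cast; omega
      · intro _
        have hc : PySem.List.pyGetD S ((f + 1 : ℕ) : Int) 0 ≤ bound := by
          exact_mod_cast hlast
        exact hdc j (f + 1) hj (le_refl _) hc
    · have hk : kmax S bound (f + 1) = kmax S bound f := by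
        simp [kmax, hlast]
      rw [hk]
      rcases Nat.lt_or_ge j (f + 1) with hlt | hge
      · exact ih (fun i j hij hjf => hdc i j hij (by omega)) j (by omega)
      · have hje : j = f + 1 := by omega
        subst hje
        constructor
        · intro hh
          exact absurd (by push_cast at hh ⊢; exact hh) hlast
        · intro hh
          have := kmax_le S bound f
          push_cast at hh
          omega

-- S[j] ≤ bound is downward closed in j (S = sufmins P is nondecreasing)
theorem sufmins_hdc (P : List Int) (bound : Int) (N : ℕ) (hP : P.length = N + 1) :
    ∀ i j : ℕ, i ≤ j → j ≤ N → PySem.List.pyGetD (sufmins P) (j : Int) 0 ≤ bound →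
      PySem.List.pyGetD (sufmins P) (i : Int) 0 ≤ bound := by
  intro i j hij hj hpb
  rw [pyGetD_nat] at hpb ⊢
  rcases sufmins_exists P j (by omega) with ⟨k, hjk, hk, hkeq⟩
  have hle := sufmins_le P i k (by omega) hk
  omega

-- if kmax ≥ 0 then P itself satisfies the bound at kmax
theorem kmax_pred (P : List Int) (bound : Int) (N : ℕ) (hP : P.length = N + 1)
    (h0 : 0 ≤ kmax (sufmins P) bound N) :
    PySem.List.pyGetD P (kmax (sufmins P) bound N) 0 ≤ bound := by
  set K := kmax (sufmins P) bound N with hKdef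
  have hKle : K ≤ (N : Int) := kmax_le _ _ _
  have hiff := kmax_iff (sufmins P) bound N (sufmins_hdc P bound N hP)
  have hKnat : ((K.toNat : ℕ) : Int) = K := by omega
  have hKN : K.toNat ≤ N := by omega
  have hpb : PySem.List.pyGetD (sufmins P) ((K.toNat : ℕ) : Int) 0 ≤ bound := by
    rw [hiff K.toNat hKN]; omega
  rw [pyGetD_nat] at hpb
  rcases sufmins_exists P K.toNat (by omega) with ⟨k, hjk, hk, hkeq⟩
  have hPk : P.getD k 0 ≤ bound := by omega
  have hSk : (sufmins P).getD k 0 ≤ P.getD k 0 := sufmins_le P k k (le_refl _) hk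
  have hkK : (k : Int) ≤ K := by
    rw [← hiff k (by omega), pyGetD_nat]
    omega
  have hkeq2 : k = K.toNat := by omega
  subst hkeq2
  rw [← hKnat, pyGetD_nat]
  omega

-- any index satisfying the bound on P is ≤ kmax
theorem le_kmax (P : List Int) (bound : Int) (N : ℕ) (hP : P.length = N + 1)
    (j : ℕ) (hj : j ≤ N) (hpred : PySem.List.pyGetD P (j : Int) 0 ≤ bound) :
    (j : Int) ≤ kmax (sufmins P) bound N := by
  rw [← kmax_iff (sufmins P) bound N (sufmins_hdc P bound N hP) j hj, pyGetD_nat]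
  have hSk : (sufmins P).getD j 0 ≤ P.getD j 0 := sufmins_le P j j (le_refl _) (by omega)
  rw [pyGetD_nat] at hpred
  omega

-- the binary search finds the greatest index ≤ K in the window [lo, hi], else the sentinel
theorem bsearch_eq (S : List Int) (bound n K : Int)
    (hK : ∀ j : Int, 0 ≤ j → j ≤ n → (PySem.List.pyGetD S j 0 ≤ bound ↔ j ≤ K)) :
    ∀ m : ℕ, ∀ lo hi ans : Int, (hi + 1 - lo).toNat ≤ m → 0 ≤ lo → hi ≤ n →
      bsearch S bound lo hi ans = if lo ≤ hi ∧ lo ≤ K then min K hi else ans := by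
  intro m
  induction m with
  | zero =>
    intro lo hi ans hm hlo hhi
    rw [bsearch, dif_neg (by omega), if_neg (by omega)]
  | succ m ih =>
    intro lo hi ans hm hlo hhi
    by_cases h : lo ≤ hi
    · rw [bsearch, dif_pos h]
      have hmid := PySem.Int.floordiv_two_mid_bounds h
      set mid := PySem.Int.floordiv (lo + hi) 2 with hmiddef
      by_cases hp : PySem.List.pyGetD S mid 0 ≤ bound
      · have hmK : mid ≤ K := (hK mid (by omega) (by omega)).mp hp
        rw [if_pos hp, ih (mid + 1) hi mid (by omega) (by omega) hhi]
        split_ifs <;> omega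
      · have hmK : ¬ (mid ≤ K) := fun hh => hp ((hK mid (by omega) (by omega)).mpr hh)
        rw [if_neg hp, ih lo (mid - 1) ans (by omega) hlo (by omega)]
        split_ifs <;> omega
    · rw [bsearch, dif_neg h, if_neg (by omega)]

-- the best admissible window length among r ∈ [l, l+m) (proof-side view of A's inner loop)
def gbest (P : List Int) (bound l : Int) : ℕ → Int
  | 0 => 0
  | (m + 1) => if PySem.List.pyGetD P (l + (m : Int) + 1) 0 ≤ bound then (m : Int) + 1
               else gbest P bound l m

theorem gbest_bounds (P : List Int) (bound l : Int) (m : ℕ) :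
    0 ≤ gbest P bound l m ∧ gbest P bound l m ≤ (m : Int) := by
  induction m with
  | zero => simp [gbest]
  | succ m ih => simp only [gbest]; split <;> push_cast <;> omega

theorem gbest_spec (P : List Int) (bound l : Int) : ∀ m : ℕ,
    (gbest P bound l m = 0 ∧
      ∀ j : Int, l + 1 ≤ j → j ≤ l + (m : Int) → ¬ (PySem.List.pyGetD P j 0 ≤ bound)) ∨
    (1 ≤ gbest P bound l m ∧ gbest P bound l m ≤ (m : Int) ∧
      PySem.List.pyGetD P (l + gbest P bound l m) 0 ≤ bound ∧
      ∀ j : Int, l + gbest P bound l m < j → j ≤ l + (m : Int) →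
        ¬ (PySem.List.pyGetD P j 0 ≤ bound)) := by
  intro m
  induction m with
  | zero =>
    left
    exact ⟨rfl, fun j h1 h2 _ => by push_cast at h2; omega⟩
  | succ m ih =>
    by_cases hp : PySem.List.pyGetD P (l + (m : Int) + 1) 0 ≤ bound
    · right
      have hg : gbest P bound l (m + 1) = (m : Int) + 1 := by simp [gbest, hp]
      refine ⟨by rw [hg]; omega, by rw [hg]; push_cast; omega, ?_, ?_⟩
      · rw [hg, ← add_assoc]; exact hp
      · intro j h1 h2; rw [hg] at h1; push_cast at h2; omega
    · have hg : gbest P bound l (m + 1) = gbest P bound l m := by simp [gbest, hp]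
      rcases ih with ⟨h0, hnone⟩ | ⟨h1, hle, hpred, hnone⟩
      · left
        refine ⟨by rw [hg]; exact h0, ?_⟩
        intro j hj1 hj2 hj3
        push_cast at hj2
        rcases lt_or_ge j (l + (m : Int) + 1) with hlt | hge
        · exact hnone j hj1 (by omega) hj3
        · have hje : j = l + (m : Int) + 1 := by omega
          subst hje; exact hp hj3
      · right
        refine ⟨by rw [hg]; exact h1, by rw [hg]; push_cast; omega, by rw [hg]; exact hpred, ?_⟩
        intro j hj1 hj2 hj3
        rw [hg] at hj1
        push_cast at hj2
        rcases lt_or_ge j (l + (m : Int) + 1) with hlt | hge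
        · exact hnone j hj1 (by omega) hj3
        · have hje : j = l + (m : Int) + 1 := by omega
          subst hje; exact hp hj3

-- A's inner loop computes max acc (gbest …)
theorem innerA (P : List Int) (c t l : Int) : ∀ m : ℕ, ∀ acc : Int, 0 ≤ acc →
    (PySem.List.pyRange l (l + (m : Int)) 1).foldl
      (fun acc r => if PySem.List.pyGetD P (r + 1) 0 - c ≤ t then max acc (r - l + 1) else acc) acc
      = max acc (gbest P (t + c) l m) := by
  intro m
  induction m with
  | zero =>
    intro acc hacc
    rw [show l + ((0 : ℕ) : Int) = l by push_cast; ring]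
    rw [PySem.List.pyRange_one_eq_nil (le_refl l)]
    simp only [List.foldl_nil, gbest]
    omega
  | succ m ih =>
    intro acc hacc
    rw [show l + ((m + 1 : ℕ) : Int) = (l + (m : Int)) + 1 by push_cast; ring]
    rw [PySem.List.pyRange_one_succ_right (by omega : l ≤ l + (m : Int)), List.foldl_append]
    rw [ih acc hacc]
    simp only [List.foldl]
    have hgb := gbest_bounds P (t + c) l m
    by_cases hp : PySem.List.pyGetD P (l + (m : Int) + 1) 0 ≤ t + c
    · rw [if_pos (by omega)]
      have hg : gbest P (t + c) l (m + 1) = (m : Int) + 1 := by simp [gbest, hp]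
      rw [hg]
      omega
    · rw [if_neg (by omega)]
      have hg : gbest P (t + c) l (m + 1) = gbest P (t + c) l m := by simp [gbest, hp]
      rw [hg]

-- gbest over the full window equals the kmax characterisation
theorem gbest_eq_K (P : List Int) (bound : Int) (N : ℕ) (hP : P.length = N + 1)
    (l : Int) (hl : 0 ≤ l) (hln : l < (N : Int)) :
    gbest P bound l ((N : Int) - l).toNat
      = if l + 1 ≤ kmax (sufmins P) bound N then kmax (sufmins P) bound N - l else 0 := by
  set K := kmax (sufmins P) bound N with hKdef
  set m := ((N : Int) - l).toNat with hmdef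
  have hm : l + (m : Int) = (N : Int) := by omega
  have hKle : K ≤ (N : Int) := kmax_le _ _ _
  rcases gbest_spec P bound l m with ⟨h0, hnone⟩ | ⟨h1, hle, hpred, hnone⟩
  · rw [if_neg]
    · exact h0
    · intro hc
      have h0K : 0 ≤ K := by omega
      exact hnone K hc (by omega) (kmax_pred P bound N hP h0K)
  · set g := gbest P bound l m with hgdef
    have hjnat : (((l + g).toNat : ℕ) : Int) = l + g := by omega
    have hjK : l + g ≤ K := by
      have := le_kmax P bound N hP (l + g).toNat (by omega) (by rw [hjnat]; exact hpred)
      omega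
    have h0K : 0 ≤ K := by omega
    have hKj : K ≤ l + g := by
      by_contra hc
      exact hnone K (by omega) (by omega) (kmax_pred P bound N hP h0K)
    rw [if_pos (by omega)]
    omega

-- per-l step equality plus outer-fold congruence
theorem outer_fold (P : List Int) (threshold : Int) (N : ℕ) (hP : P.length = N + 1) :
    ∀ L : List Int, (∀ l ∈ L, 0 ≤ l ∧ l < (N : Int)) → ∀ acc : Int, 0 ≤ acc →
      L.foldl (fun maxLen l =>
        (PySem.List.pyRange l (N : Int) 1).foldl (fun acc r =>
          if PySem.List.pyGetD P (r + 1) 0 - 2 * PySem.List.pyGetD P l 0 ≤ threshold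
          then max acc (r - l + 1) else acc) maxLen) acc
      = L.foldl (fun best l =>
          if bsearch (sufmins P) (threshold + 2 * PySem.List.pyGetD P l 0) (l + 1) (N : Int) l - l > best
          then bsearch (sufmins P) (threshold + 2 * PySem.List.pyGetD P l 0) (l + 1) (N : Int) l - l
          else best) acc := by
  intro L
  induction L with
  | nil => intro _ acc _; rfl
  | cons l L ihL =>
    intro hmem acc hacc
    obtain ⟨hl0, hlN⟩ := hmem l (List.mem_cons_self)
    set bound := threshold + 2 * PySem.List.pyGetD P l 0 with hbdef
    set K := kmax (sufmins P) bound N with hKdef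
    have hKle : K ≤ (N : Int) := kmax_le _ _ _
    have hKge : -1 ≤ K := kmax_ge _ _ _
    have hiffN : ∀ j : Int, 0 ≤ j → j ≤ (N : Int) →
        (PySem.List.pyGetD (sufmins P) j 0 ≤ bound ↔ j ≤ K) := by
      intro j hj0 hjN
      have hjn : ((j.toNat : ℕ) : Int) = j := by omega
      rw [← hjn]
      exact kmax_iff (sufmins P) bound N (sufmins_hdc P bound N hP) j.toNat (by omega)
    have hbs : bsearch (sufmins P) bound (l + 1) (N : Int) l
        = if l + 1 ≤ K then K else l := by
      rw [bsearch_eq (sufmins P) bound (N : Int) K hiffN ((N : Int) + 1 - (l + 1)).toNat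
        (l + 1) (N : Int) l (le_refl _) (by omega) (le_refl _)]
      split_ifs <;> omega
    have hinner : ∀ a : Int, 0 ≤ a →
        (PySem.List.pyRange l (N : Int) 1).foldl (fun acc r =>
          if PySem.List.pyGetD P (r + 1) 0 - 2 * PySem.List.pyGetD P l 0 ≤ threshold
          then max acc (r - l + 1) else acc) a
        = max a (if l + 1 ≤ K then K - l else 0) := by
      intro a ha
      have hNe : (N : Int) = l + ((((N : Int) - l).toNat : ℕ) : Int) := by omega
      rw [hNe, innerA P (2 * PySem.List.pyGetD P l 0) threshold l (((N : Int) - l).toNat) a ha]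
      rw [gbest_eq_K P bound N hP l hl0 hlN]
    simp only [List.foldl]
    rw [hinner acc hacc, hbs]
    have hstep : max acc (if l + 1 ≤ K then K - l else 0)
        = (if (if l + 1 ≤ K then K else l) - l > acc
           then (if l + 1 ≤ K then K else l) - l else acc) := by
      split_ifs <;> omega
    rw [hstep]
    exact ihL (fun x hx => hmem x (List.mem_cons_of_mem _ hx)) _ (by split_ifs <;> omega)

-- ===== VERDICT (by name: the statement is the Claim_ definition above) =====
theorem problem3_sol2_spec : Claim_equal_problem3_sol2 := by
  intro nums threshold _
  unfold Spec_problem3_sol2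
  simp only [problem3_sol2, problem3_sol2_alt]
  have hP : (nums.foldl (fun p num => p ++ [PySem.List.pyGetD p (-1) 0 + num]) [0]).length
      = nums.length + 1 := by
    rw [pfx_length]; simp; omega
  exact outer_fold _ threshold nums.length hP (PySem.List.pyRange 0 (nums.length : Int) 1)
    (fun l hl => by
      rw [PySem.List.mem_pyRange_one] at hl
      exact ⟨hl.1, hl.2⟩) 0 (le_refl 0)
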